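-- pv_equiv track=rewrite | github.com/Pppp1116/ASTRA | astra/lsp.py | _word_at
-- ===== SOURCE A (Python) =====
-- def _word_at(text: str, line: int, character: int) -> str:
--     lines = text.splitlines()
--     if line < 0 or line >= len(lines):
--         return ""
--     row = lines[line]
--     if not row:
--         return ""
--     pos = min(max(0, character), len(row) - 1)
--     if not (row[pos].isalnum() or row[pos] == "_"):
--         return ""
--     s = pos
--     e = pos
--     while s > 0 and (row[s - 1].isalnum() or row[s - 1] == "_"):
--         s -= 1
--     while e + 1 < len(row) and (row[e + 1].isalnum() or row[e + 1] == "_"):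
--         e += 1
--     return row[s : e + 1]
-- ===== SOURCE B (Python) =====
-- def _word_at(text: str, line: int, character: int) -> str:
--     lines = text.splitlines()
--     if line < 0 or line >= len(lines):
--         return ""
--     row = lines[line]
--     if not row:
--         return ""
--     pos = min(max(0, character), len(row) - 1)
--     # Single left-to-right pass over the line: track the start of the current
--     # maximal word run; when the run ends, return it if it covers pos.
--     s = 0
--     for i in range(len(row) + 1):
--         if i == len(row) or not (row[i].isalnum() or row[i] == "_"):
--             if s <= pos < i:
--                 return row[s:i]
--             s = i + 1
--     return ""
-- ===== Notes on version B (the rewrite author's own statement) =====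
-- stated objective: alternative
-- what changed: Replaces the bidirectional expand-from-pos (two while loops moving s left and e right) with a single left-to-right scan that tracks the start of the current maximal word run and returns the run that covers the clamped position (or '' if none covers it).
import Mathlib
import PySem

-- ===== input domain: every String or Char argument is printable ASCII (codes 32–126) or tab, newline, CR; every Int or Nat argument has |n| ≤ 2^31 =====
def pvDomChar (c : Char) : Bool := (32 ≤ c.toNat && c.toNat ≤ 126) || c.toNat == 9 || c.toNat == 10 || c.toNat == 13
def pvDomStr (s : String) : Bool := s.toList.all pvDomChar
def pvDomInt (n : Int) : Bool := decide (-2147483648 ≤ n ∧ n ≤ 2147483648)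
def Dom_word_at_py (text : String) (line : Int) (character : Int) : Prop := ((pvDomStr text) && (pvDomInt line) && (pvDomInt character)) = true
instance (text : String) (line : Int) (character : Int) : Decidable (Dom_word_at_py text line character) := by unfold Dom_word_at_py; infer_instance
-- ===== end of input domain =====

-- B replaces A's bidirectional expand-from-pos (two while loops) with a single
-- left-to-right scan over the line that tracks the current maximal word run and
-- returns the run covering the clamped position; same cost, alternative structure.


-- ===== PORT A =====
-- c.isalnum() or c == "_"
def pvWordChar (c : Char) : Bool := PySem.Chars.isalnum c || c == '_'

-- while s > 0 and (row[s-1].isalnum() or row[s-1] == "_"): s -= 1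
def word_at_py_left (row : List Char) (s : Nat) : Nat :=
  if h : 0 < s ∧ pvWordChar (row.getD (s - 1) ' ') then word_at_py_left row (s - 1) else s
termination_by s
decreasing_by omega

-- while e + 1 < len(row) and (row[e+1].isalnum() or row[e+1] == "_"): e += 1
def word_at_py_right (row : List Char) (e : Nat) : Nat :=
  if h : e + 1 < row.length ∧ pvWordChar (row.getD (e + 1) ' ') then word_at_py_right row (e + 1) else e
termination_by row.length - e
decreasing_by omega

def word_at_py (text : String) (line : Int) (character : Int) : String :=
  let lines := PySem.Str.splitlines text
  if line < 0 ∨ (lines.length : Int) ≤ line then ""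
  else
    let row := (PySem.List.pyGetD lines line "").toList
    if row = [] then ""
    else
      let pos := (min (max 0 character) ((row.length : Int) - 1)).toNat
      if ¬ pvWordChar (row.getD pos ' ') then ""
      else
        let s := word_at_py_left row pos
        let e := word_at_py_right row pos
        String.ofList (PySem.List.slice row (some (s : Int)) (some ((e : Int) + 1)))

-- ===== PORT B =====
-- for i in range(len(row)+1): at a run boundary, return row[s:i] if it covers pos, else reset s
def word_at_py_alt_scan (row : List Char) (pos : Nat) (i s : Nat) : String :=
  if h : row.length < i then ""
  else if i = row.length ∨ ¬ pvWordChar (row.getD i ' ') then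
    if s ≤ pos ∧ pos < i then String.ofList (PySem.List.slice row (some (s : Int)) (some (i : Int)))
    else word_at_py_alt_scan row pos (i + 1) (i + 1)
  else word_at_py_alt_scan row pos (i + 1) s
termination_by row.length + 1 - i
decreasing_by all_goals omega

def word_at_py_alt (text : String) (line : Int) (character : Int) : String :=
  let lines := PySem.Str.splitlines text
  if line < 0 ∨ (lines.length : Int) ≤ line then ""
  else
    let row := (PySem.List.pyGetD lines line "").toList
    if row = [] then ""
    else
      let pos := (min (max 0 character) ((row.length : Int) - 1)).toNat
      word_at_py_alt_scan row pos 0 0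

-- ===== PRECONDITION & SPEC =====
def Spec_word_at_py (text : String) (line : Int) (character : Int) (out : String) : Prop := out = word_at_py_alt text line character
instance (text : String) (line : Int) (character : Int) (out : String) : Decidable (Spec_word_at_py text line character out) := by unfold Spec_word_at_py; infer_instance

-- ===== CLAIM (what is proved, stated in full; the proofs are below) =====
def Claim_equal_word_at_py : Prop := ∀ (text : String) (line : Int) (character : Int), Dom_word_at_py text line character → Spec_word_at_py text line character (word_at_py text line character)

-- ===== LEMMAS AND PROOFS =====

-- A's left while loop stops exactly at a run start it is given.
lemma left_eq (row : List Char) :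
    ∀ (n pos s : Nat), pos - s = n → s ≤ pos →
      (∀ j, s ≤ j → j ≤ pos → pvWordChar (row.getD j ' ') = true) →
      (s = 0 ∨ pvWordChar (row.getD (s - 1) ' ') = false) →
      word_at_py_left row pos = s := by
  intro n
  induction n with
  | zero =>
    intro pos s h0 hsp hw hb
    have hps : pos = s := by omega
    subst hps
    rw [word_at_py_left]
    split
    · next hg =>
      exfalso
      rcases hb with hb | hb
      · omega
      · rw [hb] at hg; simp at hg
    · rfl
  | succ n ih =>
    intro pos s h0 hsp hw hb
    have hs : s < pos := by omega
    rw [word_at_py_left]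
    split
    · next hg =>
      exact ih (pos - 1) s (by omega) (by omega) (fun j hj1 hj2 => hw j hj1 (by omega)) hb
    · next hg =>
      exfalso
      exact hg ⟨by omega, hw (pos - 1) (by omega) (by omega)⟩

-- A's right while loop stops exactly at the run end it is given.
lemma right_eq (row : List Char) :
    ∀ (n pos i : Nat), i - pos = n + 1 → pos < i → i ≤ row.length →
      (∀ j, pos ≤ j → j < i → pvWordChar (row.getD j ' ') = true) →
      (i = row.length ∨ pvWordChar (row.getD i ' ') = false) →
      word_at_py_right row pos = i - 1 := by
  intro n
  induction n with
  | zero =>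
    intro pos i h0 hpi hil hw hb
    have hip : i = pos + 1 := by omega
    subst hip
    rw [word_at_py_right]
    split
    · next hg =>
      exfalso
      rcases hb with hb | hb
      · omega
      · rw [hb] at hg; simp at hg
    · omega
  | succ n ih =>
    intro pos i h0 hpi hil hw hb
    rw [word_at_py_right]
    split
    · next hg =>
      exact ih (pos + 1) i (by omega) (by omega) hil (fun j hj1 hj2 => hw j (by omega) hj2) hb
    · next hg =>
      exfalso
      exact hg ⟨by omega, hw (pos + 1) (by omega) (by omega)⟩

-- Once the scan's run start is past pos, it can never return a word.
lemma scan_none (row : List Char) :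
    ∀ (n pos i s : Nat), row.length + 1 - i = n → pos < s → s ≤ i + 1 →
      word_at_py_alt_scan row pos i s = "" := by
  intro n
  induction n with
  | zero =>
    intro pos i s h0 hps hsi
    rw [word_at_py_alt_scan]
    rw [dif_pos (by omega)]
  | succ n ih =>
    intro pos i s h0 hps hsi
    rw [word_at_py_alt_scan]
    split
    · rfl
    · split
      · split
        · next hret => omega
        · exact ih pos (i + 1) (i + 1) (by omega) (by omega) (by omega)
      · exact ih pos (i + 1) s (by omega) hps (by omega)

-- Master invariant for B's scan: from any consistent state it produces A's answer.
lemma scan_spec (row : List Char) :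
    ∀ (n pos i s : Nat), row.length + 1 - i = n → pos < row.length → s ≤ i → i ≤ row.length →
      (∀ j, s ≤ j → j < i → pvWordChar (row.getD j ' ') = true) →
      (s = 0 ∨ pvWordChar (row.getD (s - 1) ' ') = false) →
      (i ≤ pos ∨ s ≤ pos ∨ pvWordChar (row.getD pos ' ') = false) →
      word_at_py_alt_scan row pos i s =
        if pvWordChar (row.getD pos ' ') then
          String.ofList (PySem.List.slice row (some ((word_at_py_left row pos : Nat) : Int))
            (some (((word_at_py_right row pos : Nat) : Int) + 1)))
        else "" := by
  intro n
  induction n with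
  | zero =>
    intro pos i s h0 hpos hsi hil hw hb hinv
    omega
  | succ n ih =>
    intro pos i s h0 hpos hsi hil hw hb hinv
    rw [word_at_py_alt_scan]
    rw [dif_neg (by omega)]
    split
    · next hstop =>
      split
      · next hret =>
        -- return row[s:i]: pos lies in the word run [s, i)
        have hwpos : pvWordChar (row.getD pos ' ') = true := hw pos hret.1 hret.2
        rw [if_pos hwpos]
        have hL : word_at_py_left row pos = s :=
          left_eq row (pos - s) pos s rfl hret.1 (fun j hj1 hj2 => hw j hj1 (by omega)) hb
        have hR : word_at_py_right row pos = i - 1 :=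
          right_eq row (i - pos - 1) pos i (by omega) hret.2 hil
            (fun j hj1 hj2 => hw j (by omega) hj2)
            (by
              rcases hstop with h | h
              · exact Or.inl h
              · exact Or.inr (by simpa using h))
        rw [hL, hR]
        have hcast : ((i - 1 : Nat) : Int) + 1 = (i : Int) := by omega
        rw [hcast]
      · next hret =>
        -- no return: reset the run start to i+1
        by_cases hieq : i = row.length
        · -- the recursive call falls off the end and yields ""
          have hps : pos < s := by
            rcases Decidable.em (s ≤ pos) with h | h
            · exfalso; exact hret ⟨h, by omega⟩
            · omega
          have hwf : pvWordChar (row.getD pos ' ') = false := by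
            rcases hinv with h | h | h
            · omega
            · omega
            · exact h
          rw [if_neg (by simp only [hwf]; exact Bool.false_ne_true)]
          exact scan_none row (row.length + 1 - (i + 1)) pos (i + 1) (i + 1) rfl (by omega) (by omega)
        · have hlt : i < row.length := by omega
          have hiw : pvWordChar (row.getD i ' ') = false := by
            rcases hstop with h | h
            · omega
            · simpa using h
          refine (ih pos (i + 1) (i + 1) (by omega) hpos (by omega) (by omega)
            (fun j hj1 hj2 => by omega) (by right; simpa using hiw) ?_)
          rcases Nat.lt_trichotomy pos i with h | h | h
          · right; right
            rcases hinv with h' | h' | h'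
            · omega
            · exfalso; exact hret ⟨h', h⟩
            · exact h'
          · right; right; rw [← h] at hiw; exact hiw
          · left; omega
    · next hcont =>
      -- row[i] is a word char: extend the current run
      have hiw : pvWordChar (row.getD i ' ') = true := by
        rcases Decidable.em (pvWordChar (row.getD i ' ') = true) with h | h
        · exact h
        · exfalso; exact hcont (Or.inr (by simpa using h))
      have hilen : i ≠ row.length := fun h => hcont (Or.inl h)
      refine ih pos (i + 1) s (by omega) hpos (by omega) (by omega)
        (fun j hj1 hj2 => by
          rcases Decidable.em (j < i) with h | h
          · exact hw j hj1 h
          · have : j = i := by omega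
            rw [this]; exact hiw) hb ?_
      rcases hinv with h | h | h
      · rcases Decidable.em (i = pos) with h' | h'
        · right; left; omega
        · left; omega
      · right; left; exact h
      · right; right; exact h

-- ===== VERDICT (by name: the statement is the Claim_ definition above) =====
theorem word_at_py_spec : Claim_equal_word_at_py := by
  intro text line character _
  unfold Spec_word_at_py word_at_py word_at_py_alt
  dsimp only
  set row := (PySem.List.pyGetD (PySem.Str.splitlines text) line "").toList with hrowdef
  set pos := (min (max 0 character) ((row.length : Int) - 1)).toNat with hposdef
  split_ifs with h1 h2 h3
  · rfl
  · rfl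
  · -- row[pos] is a word char (split_ifs flipped A's negated test)
    have hlen : 0 < row.length := List.length_pos_iff.mpr h2
    have hpos : pos < row.length := by rw [hposdef]; omega
    rw [scan_spec row (row.length + 1) pos 0 0 (by omega) hpos (by omega) (by omega)
      (fun j hj1 hj2 => by omega) (Or.inl rfl) (by omega)]
    rw [if_pos h3]
  · -- row[pos] is not a word char: both return ""
    have hlen : 0 < row.length := List.length_pos_iff.mpr h2
    have hpos : pos < row.length := by rw [hposdef]; omega
    rw [scan_spec row (row.length + 1) pos 0 0 (by omega) hpos (by omega) (by omega)
      (fun j hj1 hj2 => by omega) (Or.inl rfl) (by omega)]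
    rw [if_neg h3]
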